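-- pv_equiv track=rewrite | github.com/Terry9022/NTU_dataStructure_and_Algorithm | hw3-2.py | warriors
-- ===== SOURCE A (Python) =====
-- from typing import List
--
-- def warriors(strength :List[int], attack_range :List[int]):
--     """
--     Given the attributes of each warriors and output the minimal and maximum
--     index of warrior can be attacked by each warrior.
--
--     Parameters:
--       strength (List[int]): The strength value of N warriors
--       attack_range (List[int]): The range value of N warriors
--
--     Returns:
--       attack_interval (List[int]):
--           The min and the max index that the warrior can attack.
--           The format of output is 2N int array `[a0, b0, a1, b1, ...]`
--     """
--
--
--    #prints element and NGE pair for all elements of arr[]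
--     N=len(strength)
--     n=N-1
--
--
--
--     #找右邊
--     # Stores the required distances
--     ans1 = list(range(N))
--     st = [0]
--
--     # Maintain a stack of elements
--     # in non-increasing order
--     for i in range(1, N):
--
--         # If the current element exceeds
--         # the element at the top of the stack
--         while(st and strength[i] >= strength[st[-1]]):
--             pos = st.pop()
--
--             if attack_range[pos] < i-1-pos:
--                 ans1[pos]=pos+attack_range[pos]
--             else:
--                 ans1[pos] = i-1
--
--         # Push the current index to the stack
--         st.append(i)
--
--     while(len(st)!=0):
--         pos = st.pop()
--         if attack_range[pos] < N-1-pos: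
--             ans1[pos]=pos+attack_range[pos]
--         else:
--             ans1[pos] = N-1
--
--     # 找左邊
--     # Stores the required distances
--     strength.reverse()
--     attack_range.reverse()
--
--     ans2 = list(range(N))
--     st = [0]
--
--     # Maintain a stack of elements
--     # in non-increasing order
--     for i in range(1, N):
--
--         # If the current element exceeds
--         # the element at the top of the stack
--         while(st and strength[i] >= strength[st[-1]]):
--             pos = st.pop()
--
--             if attack_range[pos] < i-1-pos:
--                 ans2[n-pos]=n-(pos+attack_range[pos])
--             else:
--                 ans2[n-pos] =n-( i-1)
--
--         # Push the current index to the stack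
--         st.append(i)
--
--     while(len(st)!=0):
--         pos = st.pop()
--         if attack_range[pos] < N-1-pos:
--             ans2[n-pos]= n-(pos+attack_range[pos])
--         else:
--             ans2[n-pos] = n-(N-1)
--
--     ans3=[]
--     for i in range(N):
--         ans3.append(ans2[i])
--         ans3.append(ans1[i])
--
--
--
--
--     return ans3
-- ===== SOURCE B (Python) =====
-- def warriors(strength, attack_range):
--     N = len(strength)
--     n = N - 1
--     rights = []
--     for i in range(N):
--         k = i + 1
--         while k < N and strength[k] < strength[i]:
--             k += 1
--         rights.append(min(i + attack_range[i], k - 1))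
--     # reproduce A's observable side effect: both input lists are left reversed in place
--     strength.reverse()
--     attack_range.reverse()
--     lefts = [0] * N
--     for i in range(N):
--         k = i + 1
--         while k < N and strength[k] < strength[i]:
--             k += 1
--         lefts[n - i] = n - min(i + attack_range[i], k - 1)
--     out = []
--     for i in range(N):
--         out.append(lefts[i])
--         out.append(rights[i])
--     return out
-- ===== Notes on version B (the rewrite author's own statement) =====
-- stated objective: simpler
-- what changed: Replaced A's two monotonic-stack passes by direct per-warrior rightward scans to the first warrior of >= strength (one pass on the list for right bounds, one on its in-place-reversed copy for left bounds), clamped by the attack range; no stack, no pop bookkeeping.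
import Mathlib
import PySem

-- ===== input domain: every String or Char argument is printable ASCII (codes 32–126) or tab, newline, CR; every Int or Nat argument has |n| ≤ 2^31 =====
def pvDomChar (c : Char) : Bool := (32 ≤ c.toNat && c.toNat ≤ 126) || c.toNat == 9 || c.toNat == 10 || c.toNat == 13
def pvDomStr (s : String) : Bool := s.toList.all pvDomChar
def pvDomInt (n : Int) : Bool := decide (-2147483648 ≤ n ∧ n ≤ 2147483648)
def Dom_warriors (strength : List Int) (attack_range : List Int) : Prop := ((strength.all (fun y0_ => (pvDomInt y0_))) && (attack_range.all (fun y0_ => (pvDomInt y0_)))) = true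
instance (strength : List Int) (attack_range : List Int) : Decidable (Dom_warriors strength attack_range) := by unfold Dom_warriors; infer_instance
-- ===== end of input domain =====

-- B replaces A's two monotonic-stack passes by direct per-warrior rightward scans (one on the list, one on
-- its reversal) clamped by the range — simpler, no stack; B performs A's same in-place reversal of both inputs.


-- ===== PORT A =====
-- Indexing uses List.getD, exact here because Pre_warriors guarantees every index is in range.
-- inner `while(st and strength[i] >= strength[st[-1]])` pop loop of A's first (right-bound) pass
def popLoopR (s r : List Int) (i : Nat) : List Nat → List Int → List Nat × List Int
  | [], ans => ([], ans)
  | pos :: rest, ans =>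
    if s.getD pos 0 ≤ s.getD i 0 then
      popLoopR s r i rest
        (ans.set pos (if r.getD pos 0 < (i : Int) - 1 - (pos : Int)
                      then (pos : Int) + r.getD pos 0 else (i : Int) - 1))
    else (pos :: rest, ans)

-- one iteration of A's `for i in range(1, N)` in the first pass
def stepR (s r : List Int) (acc : List Nat × List Int) (i : Nat) : List Nat × List Int :=
  let t := popLoopR s r i acc.1 acc.2
  (i :: t.1, t.2)

-- A's trailing `while(len(st)!=0)` drain of the first pass
def drainR (s r : List Int) (N : Nat) : List Nat → List Int → List Int
  | [], ans => ans
  | pos :: rest, ans =>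
    drainR s r N rest
      (ans.set pos (if r.getD pos 0 < (N : Int) - 1 - (pos : Int)
                    then (pos : Int) + r.getD pos 0 else (N : Int) - 1))

-- inner pop loop of A's second (left-bound) pass: same scan, writes at n-pos / value n-(…)
def popLoopL (s r : List Int) (n i : Nat) : List Nat → List Int → List Nat × List Int
  | [], ans => ([], ans)
  | pos :: rest, ans =>
    if s.getD pos 0 ≤ s.getD i 0 then
      popLoopL s r n i rest
        (ans.set (n - pos) (if r.getD pos 0 < (i : Int) - 1 - (pos : Int)
                            then (n : Int) - ((pos : Int) + r.getD pos 0) else (n : Int) - ((i : Int) - 1)))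
    else (pos :: rest, ans)

def stepL (s r : List Int) (n : Nat) (acc : List Nat × List Int) (i : Nat) : List Nat × List Int :=
  let t := popLoopL s r n i acc.1 acc.2
  (i :: t.1, t.2)

def drainL (s r : List Int) (n N : Nat) : List Nat → List Int → List Int
  | [], ans => ans
  | pos :: rest, ans =>
    drainL s r n N rest
      (ans.set (n - pos) (if r.getD pos 0 < (N : Int) - 1 - (pos : Int)
                          then (n : Int) - ((pos : Int) + r.getD pos 0) else (n : Int) - ((N : Int) - 1)))

def warriors (strength : List Int) (attack_range : List Int) : List Int :=
  let N := strength.length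
  let n := N - 1
  -- 找右邊: ans1 = list(range(N)); stack loop; drain
  let init1 : List Int := (List.range N).map (fun (p : Nat) => (p : Int))
  let t1 := (List.range' 1 (N - 1)).foldl (stepR strength attack_range) ([0], init1)
  let ans1 := drainR strength attack_range N t1.1 t1.2
  -- 找左邊: strength.reverse(); attack_range.reverse(); same stack scan writing ans2[n-pos] = n - …
  let s2 := strength.reverse
  let r2 := attack_range.reverse
  let init2 : List Int := (List.range N).map (fun (p : Nat) => (p : Int))
  let t2 := (List.range' 1 (N - 1)).foldl (stepL s2 r2 n) ([0], init2)
  let ans2 := drainL s2 r2 n N t2.1 t2.2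
  -- ans3 interleave
  (List.range N).foldl (fun acc i => acc ++ [ans2.getD i 0, ans1.getD i 0]) []

-- ===== PORT B =====
-- `while k < N and strength[k] < strength[i]: k += 1`
def scanR (s : List Int) (si : Int) (N : Nat) (k : Nat) : Nat :=
  if k < N then (if s.getD k 0 < si then scanR s si N (k + 1) else k) else k
termination_by N - k

def warriors_alt (strength : List Int) (attack_range : List Int) : List Int :=
  let N := strength.length
  let n := N - 1
  let rights := (List.range N).foldl (fun (acc : List Int) (i : Nat) =>
    acc ++ [min ((i : Int) + attack_range.getD i 0)
              ((scanR strength (strength.getD i 0) N (i + 1) : Int) - 1)]) []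
  -- reproduce A's observable side effect: both input lists are left reversed in place
  let s2 := strength.reverse
  let r2 := attack_range.reverse
  let lefts := (List.range N).foldl (fun (l : List Int) (i : Nat) =>
    l.set (n - i) ((n : Int) - min ((i : Int) + r2.getD i 0)
                     ((scanR s2 (s2.getD i 0) N (i + 1) : Int) - 1))) (List.replicate N 0)
  (List.range N).foldl (fun acc i => acc ++ [lefts.getD i 0, rights.getD i 0]) []

-- ===== PRECONDITION & SPEC =====
-- Exactly the inputs on which A returns: A raises IndexError on empty strength and whenever
-- attack_range is shorter than strength (both passes index attack_range at every position of strength).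
def Pre_warriors (strength : List Int) (attack_range : List Int) : Prop :=
  strength ≠ [] ∧ strength.length ≤ attack_range.length
instance (strength : List Int) (attack_range : List Int) : Decidable (Pre_warriors strength attack_range) := by
  unfold Pre_warriors; infer_instance
def pvWitness_warriors : List Int × List Int := ([3, 1, 2], [1, 2, 1])

def Spec_warriors (strength : List Int) (attack_range : List Int) (out : List Int) : Prop :=
  out = warriors_alt strength attack_range
instance (strength : List Int) (attack_range : List Int) (out : List Int) : Decidable (Spec_warriors strength attack_range out) := by
  unfold Spec_warriors; infer_instance

-- ===== CLAIM (what is proved, stated in full; the proofs are below) =====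
def Claim_equal_warriors : Prop := ∀ (strength : List Int) (attack_range : List Int), Dom_warriors strength attack_range → Pre_warriors strength attack_range → Spec_warriors strength attack_range (warriors strength attack_range)

-- ===== LEMMAS AND PROOFS =====

-- the value A writes when popping index pos at scan position i (also the drain value with i := N)
def wrV (r : List Int) (i pos : Nat) : Int :=
  if r.getD pos 0 < (i : Int) - 1 - (pos : Int) then (pos : Int) + r.getD pos 0 else (i : Int) - 1

-- indices p < M with no later processed index of >= strength (the stack's contents, bottom-to-top)
def cands (s : List Int) (M : Nat) : List Nat :=
  (List.range M).filter (fun p => decide (∀ q, q < M → p < q → s.getD q 0 < s.getD p 0))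

lemma mem_cands {s : List Int} {M p : Nat} :
    p ∈ cands s M ↔ p < M ∧ ∀ q, q < M → p < q → s.getD q 0 < s.getD p 0 := by
  simp [cands, List.mem_filter, List.mem_range]

lemma getD_set_self' (l : List Int) (n : Nat) (a : Int) (h : n < l.length) :
    (l.set n a).getD n 0 = a := by
  simp [List.getD_eq_getElem?_getD, h]

lemma getD_set_ne' (l : List Int) (n q : Nat) (a : Int) (h : q ≠ n) :
    (l.set n a).getD q 0 = l.getD q 0 := by
  simp [List.getD_eq_getElem?_getD, List.getElem?_set_ne (Ne.symm h)]

lemma mapRange_getD (f : Nat → Int) (N j : Nat) (hj : j < N) :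
    ((List.range N).map f).getD j 0 = f j := by
  have hsome : ((List.range N).map f)[j]? = some (f j) := by
    rw [List.getElem?_map, List.getElem?_range hj]
    rfl
  rw [List.getD_eq_getElem?_getD, hsome]
  rfl

lemma cands_one (s : List Int) : cands s 1 = [0] := by
  unfold cands
  rw [List.range_one]
  rw [List.filter_cons]
  simp only [decide_eq_true_eq]
  rw [if_pos (by intro q hq hq2; omega)]
  rfl

lemma cands_succ (s : List Int) (M : Nat) :
    cands s (M + 1) =
      (cands s M).filter (fun p => decide (s.getD M 0 < s.getD p 0)) ++ [M] := by
  unfold cands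
  rw [List.filter_filter, List.range_succ, List.filter_append]
  congr 1
  · apply List.filter_congr
    intro p hp
    have hpM : p < M := List.mem_range.mp hp
    rw [← Bool.decide_and]
    apply decide_eq_decide.mpr
    constructor
    · intro h
      exact ⟨h M (by omega) hpM, fun q hq hpq => h q (by omega) hpq⟩
    · rintro ⟨h2, h3⟩ q hq hpq
      rcases Nat.lt_succ_iff_lt_or_eq.mp hq with h | h
      · exact h3 q h hpq
      · subst h; exact h2
  · rw [List.filter_cons]
    rw [if_pos (by simp only [decide_eq_true_eq]; intro q hq hq2; omega)]
    rfl

lemma cands_pairwise (s : List Int) (M : Nat) :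
    (cands s M).Pairwise (fun a b => s.getD b 0 < s.getD a 0) := by
  have h1 : (cands s M).Pairwise (· < ·) :=
    List.Pairwise.sublist List.filter_sublist List.pairwise_lt_range
  refine List.Pairwise.imp_of_mem ?_ h1
  intro a b ha hb hab
  rcases mem_cands.mp ha with ⟨_, hprop⟩
  exact hprop b (mem_cands.mp hb).1 hab

-- scanR is the first index m ≥ k that is N or carries strength ≥ si
lemma scanR_char (s : List Int) (si : Int) (N : Nat) :
    ∀ d k m, m - k = d → k ≤ m → m ≤ N →
      (∀ q, k ≤ q → q < m → s.getD q 0 < si) →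
      (m = N ∨ ¬ s.getD m 0 < si) →
      scanR s si N k = m := by
  intro d
  induction d with
  | zero =>
    intro k m hd hk hm hblk hstop
    have hkm : k = m := by omega
    subst hkm
    rw [scanR]
    rcases hstop with h | h
    · rw [if_neg (by omega : ¬ k < N)]
    · by_cases hkN : k < N
      · rw [if_pos hkN, if_neg h]
      · rw [if_neg hkN]
  | succ d ih =>
    intro k m hd hk hm hblk hstop
    have hkm : k < m := by omega
    have hkN : k < N := by omega
    rw [scanR, if_pos hkN, if_pos (hblk k le_rfl hkm)]
    exact ih (k + 1) m (by omega) (by omega) hm (fun q hq1 hq2 => hblk q (by omega) hq2) hstop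

-- B's lefts array: every index n - i is written exactly once, by iteration i
lemma foldl_set_rev (h : Nat → Int) (n N : Nat) (hn : n + 1 = N) :
    ∀ m, m ≤ N →
      ((List.range m).foldl (fun l i => l.set (n - i) (h i)) (List.replicate N (0 : Int))).length = N ∧
      ∀ q, q < N →
        ((List.range m).foldl (fun l i => l.set (n - i) (h i)) (List.replicate N (0 : Int))).getD q 0 =
          if n - q < m then h (n - q) else 0 := by
  intro m
  induction m with
  | zero =>
    intro _
    refine ⟨by simp, fun q hq => ?_⟩
    rw [if_neg (by omega)]
    rw [List.range_zero, List.foldl_nil, List.getD_eq_getElem?_getD, List.getElem?_replicate]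
    rw [if_pos hq]
    rfl
  | succ m ih =>
    intro hm
    obtain ⟨ihlen, ihpt⟩ := ih (by omega)
    rw [List.range_succ, List.foldl_append]
    refine ⟨by rw [List.foldl_cons, List.foldl_nil, List.length_set, ihlen], fun q hq => ?_⟩
    rw [List.foldl_cons, List.foldl_nil]
    by_cases hqe : q = n - m
    · have hnm : n - q = m := by omega
      rw [hqe, getD_set_self' _ _ _ (by rw [ihlen]; omega)]
      rw [← hqe, hnm, if_pos (by omega)]
    · rw [getD_set_ne' _ _ _ _ hqe, ihpt q hq]
      by_cases hlt : n - q < m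
      · rw [if_pos hlt, if_pos (by omega)]
      · rw [if_neg hlt, if_neg (by omega)]

-- the pop loop of A's first pass, characterised: it pops exactly the stacked indices of strength ≤ s[i]
lemma popLoopR_spec (s r : List Int) (i : Nat) :
    ∀ (st : List Nat) (ans : List Int),
      st.Pairwise (fun a b => s.getD a 0 < s.getD b 0) →
      (∀ p ∈ st, p < ans.length) →
      (popLoopR s r i st ans).1 = st.filter (fun p => decide (s.getD i 0 < s.getD p 0)) ∧
      (popLoopR s r i st ans).2.length = ans.length ∧
      ∀ q : Nat, (popLoopR s r i st ans).2.getD q 0 =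
        if q ∈ st ∧ s.getD q 0 ≤ s.getD i 0 then wrV r i q else ans.getD q 0 := by
  intro st
  induction st with
  | nil =>
    intro ans _ _
    refine ⟨rfl, rfl, fun q => ?_⟩
    simp [popLoopR]
  | cons pos rest ih =>
    intro ans hpw hbd
    have hpw' := hpw.of_cons
    have hhead : ∀ q ∈ rest, s.getD pos 0 < s.getD q 0 :=
      fun q hq => List.rel_of_pairwise_cons hpw hq
    by_cases hc : s.getD pos 0 ≤ s.getD i 0
    · have hstep : popLoopR s r i (pos :: rest) ans =
          popLoopR s r i rest (ans.set pos (wrV r i pos)) := by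
        rw [popLoopR, if_pos hc]; rfl
      have hbd' : ∀ p ∈ rest, p < (ans.set pos (wrV r i pos)).length := by
        intro p hp; rw [List.length_set]; exact hbd p (List.mem_cons_of_mem _ hp)
      obtain ⟨ihst, ihlen, ihpt⟩ := ih (ans.set pos (wrV r i pos)) hpw' hbd'
      rw [hstep]
      refine ⟨?_, by rw [ihlen, List.length_set], fun q => ?_⟩
      · rw [ihst, List.filter_cons]
        rw [if_neg (by simpa using not_lt.mpr hc)]
      · rw [ihpt q]
        by_cases hq1 : q ∈ rest ∧ s.getD q 0 ≤ s.getD i 0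
        · rw [if_pos hq1, if_pos ⟨List.mem_cons_of_mem _ hq1.1, hq1.2⟩]
        · rw [if_neg hq1]
          by_cases hqpos : q = pos
          · subst hqpos
            rw [getD_set_self' _ _ _ (hbd q (List.mem_cons_self))]
            rw [if_pos ⟨List.mem_cons_self, hc⟩]
          · rw [getD_set_ne' _ _ _ _ hqpos]
            have : ¬ (q ∈ pos :: rest ∧ s.getD q 0 ≤ s.getD i 0) := by
              intro ⟨hmem, hle⟩
              rcases List.mem_cons.mp hmem with h | h
              · exact hqpos h
              · exact hq1 ⟨h, hle⟩
            rw [if_neg this]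
    · have hstep : popLoopR s r i (pos :: rest) ans = (pos :: rest, ans) := by
        rw [popLoopR, if_neg hc]
      rw [hstep]
      have hgt : ∀ q ∈ pos :: rest, s.getD i 0 < s.getD q 0 := by
        intro q hq
        rcases List.mem_cons.mp hq with h | h
        · subst h; exact not_le.mp hc
        · exact lt_trans (not_le.mp hc) (hhead q h)
      refine ⟨?_, rfl, fun q => ?_⟩
      · symm
        rw [List.filter_eq_self]
        intro a ha
        simpa using hgt a ha
      · have : ¬ (q ∈ pos :: rest ∧ s.getD q 0 ≤ s.getD i 0) := by
          intro ⟨hmem, hle⟩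
          exact absurd hle (not_le.mpr (hgt q hmem))
        rw [if_neg this]

-- A's trailing drain writes the i := N value at every remaining stacked index
lemma drainR_spec (s r : List Int) (N : Nat) :
    ∀ (st : List Nat) (ans : List Int),
      (∀ p ∈ st, p < ans.length) →
      (drainR s r N st ans).length = ans.length ∧
      ∀ q : Nat, (drainR s r N st ans).getD q 0 =
        if q ∈ st then wrV r N q else ans.getD q 0 := by
  intro st
  induction st with
  | nil =>
    intro ans _
    exact ⟨rfl, fun q => by simp [drainR]⟩
  | cons pos rest ih =>
    intro ans hbd
    have hstep : drainR s r N (pos :: rest) ans = drainR s r N rest (ans.set pos (wrV r N pos)) := by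
      rw [drainR]; rfl
    have hbd' : ∀ p ∈ rest, p < (ans.set pos (wrV r N pos)).length := by
      intro p hp; rw [List.length_set]; exact hbd p (List.mem_cons_of_mem _ hp)
    obtain ⟨ihlen, ihpt⟩ := ih (ans.set pos (wrV r N pos)) hbd'
    rw [hstep]
    refine ⟨by rw [ihlen, List.length_set], fun q => ?_⟩
    rw [ihpt q]
    by_cases hq1 : q ∈ rest
    · rw [if_pos hq1, if_pos (List.mem_cons_of_mem _ hq1)]
    · rw [if_neg hq1]
      by_cases hqpos : q = pos
      · subst hqpos
        rw [getD_set_self' _ _ _ (hbd q (List.mem_cons_self))]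
        rw [if_pos List.mem_cons_self]
      · rw [getD_set_ne' _ _ _ _ hqpos]
        have : q ∉ pos :: rest := by
          intro hmem
          rcases List.mem_cons.mp hmem with h | h
          · exact hqpos h
          · exact hq1 h
        rw [if_neg this]

-- A's second-pass pop loop is the first-pass pop loop under q ↦ n - q, v ↦ n - v
lemma popLoopL_rel (s r : List Int) (n i N : Nat) (hn : n + 1 = N) :
    ∀ (st : List Nat) (ans2 ans1 : List Int),
      (∀ p ∈ st, p < N) → ans2.length = N → ans1.length = N →
      (∀ q, q < N → ans2.getD q 0 = (n : Int) - ans1.getD (n - q) 0) →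
      (popLoopL s r n i st ans2).1 = (popLoopR s r i st ans1).1 ∧
      (∀ p ∈ (popLoopL s r n i st ans2).1, p ∈ st) ∧
      (popLoopL s r n i st ans2).2.length = N ∧
      (popLoopR s r i st ans1).2.length = N ∧
      (∀ q, q < N → (popLoopL s r n i st ans2).2.getD q 0 =
        (n : Int) - (popLoopR s r i st ans1).2.getD (n - q) 0) := by
  intro st
  induction st with
  | nil =>
    intro ans2 ans1 _ h2 h1 hrel
    exact ⟨rfl, fun p hp => hp, h2, h1, fun q hq => by simpa [popLoopL, popLoopR] using hrel q hq⟩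
  | cons pos rest ih =>
    intro ans2 ans1 hbd h2 h1 hrel
    have hposN : pos < N := hbd pos List.mem_cons_self
    by_cases hc : s.getD pos 0 ≤ s.getD i 0
    · have hstepL : popLoopL s r n i (pos :: rest) ans2 =
          popLoopL s r n i rest (ans2.set (n - pos) ((n : Int) - wrV r i pos)) := by
        rw [popLoopL, if_pos hc]
        congr 1
        unfold wrV
        split_ifs <;> rfl
      have hstepR : popLoopR s r i (pos :: rest) ans1 =
          popLoopR s r i rest (ans1.set pos (wrV r i pos)) := by
        rw [popLoopR, if_pos hc]; rfl
      rw [hstepL, hstepR]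
      have hrel' : ∀ q, q < N →
          (ans2.set (n - pos) ((n : Int) - wrV r i pos)).getD q 0 =
          (n : Int) - (ans1.set pos (wrV r i pos)).getD (n - q) 0 := by
        intro q hq
        by_cases hqe : q = n - pos
        · subst hqe
          rw [getD_set_self' _ _ _ (by omega : n - pos < ans2.length)]
          have : n - (n - pos) = pos := by omega
          rw [this, getD_set_self' _ _ _ (by omega : pos < ans1.length)]
        · rw [getD_set_ne' _ _ _ _ hqe]
          have hne2 : n - q ≠ pos := by omega
          rw [getD_set_ne' _ _ _ _ hne2]
          exact hrel q hq
      obtain ⟨ha, hb, hc2, hd, he⟩ := ih _ _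
        (fun p hp => hbd p (List.mem_cons_of_mem _ hp))
        (by rw [List.length_set]; exact h2) (by rw [List.length_set]; exact h1) hrel'
      exact ⟨ha, fun p hp => List.mem_cons_of_mem _ (hb p hp), hc2, hd, he⟩
    · have hstepL : popLoopL s r n i (pos :: rest) ans2 = (pos :: rest, ans2) := by
        rw [popLoopL, if_neg hc]
      have hstepR : popLoopR s r i (pos :: rest) ans1 = (pos :: rest, ans1) := by
        rw [popLoopR, if_neg hc]
      rw [hstepL, hstepR]
      exact ⟨rfl, fun p hp => hp, h2, h1, hrel⟩

-- ditto for the drains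
lemma drainL_rel (s r : List Int) (n N : Nat) (hn : n + 1 = N) :
    ∀ (st : List Nat) (ans2 ans1 : List Int),
      (∀ p ∈ st, p < N) → ans2.length = N → ans1.length = N →
      (∀ q, q < N → ans2.getD q 0 = (n : Int) - ans1.getD (n - q) 0) →
      ∀ q, q < N → (drainL s r n N st ans2).getD q 0 =
        (n : Int) - (drainR s r N st ans1).getD (n - q) 0 := by
  intro st
  induction st with
  | nil =>
    intro ans2 ans1 _ _ _ hrel q hq
    simpa [drainL, drainR] using hrel q hq
  | cons pos rest ih =>
    intro ans2 ans1 hbd h2 h1 hrel q hq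
    have hposN : pos < N := hbd pos List.mem_cons_self
    have hstepL : drainL s r n N (pos :: rest) ans2 =
        drainL s r n N rest (ans2.set (n - pos) ((n : Int) - wrV r N pos)) := by
      rw [drainL]
      congr 1
      unfold wrV
      split_ifs <;> rfl
    have hstepR : drainR s r N (pos :: rest) ans1 =
        drainR s r N rest (ans1.set pos (wrV r N pos)) := by
      rw [drainR]; rfl
    rw [hstepL, hstepR]
    refine ih _ _ (fun p hp => hbd p (List.mem_cons_of_mem _ hp))
      (by rw [List.length_set]; exact h2) (by rw [List.length_set]; exact h1) ?_ q hq
    intro q' hq'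
    by_cases hqe : q' = n - pos
    · subst hqe
      rw [getD_set_self' _ _ _ (by omega : n - pos < ans2.length)]
      have : n - (n - pos) = pos := by omega
      rw [this, getD_set_self' _ _ _ (by omega : pos < ans1.length)]
    · rw [getD_set_ne' _ _ _ _ hqe]
      have hne2 : n - q' ≠ pos := by omega
      rw [getD_set_ne' _ _ _ _ hne2]
      exact hrel q' hq'

-- A's second-pass main loop is its first-pass main loop under the same transformation
lemma foldSteps_rel (s r : List Int) (n N : Nat) (hn : n + 1 = N) :
    ∀ (L : List Nat) (st : List Nat) (a2 a1 : List Int),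
      (∀ p ∈ st, p < N) → (∀ i ∈ L, i < N) → a2.length = N → a1.length = N →
      (∀ q, q < N → a2.getD q 0 = (n : Int) - a1.getD (n - q) 0) →
      (L.foldl (stepL s r n) (st, a2)).1 = (L.foldl (stepR s r) (st, a1)).1 ∧
      (∀ p ∈ (L.foldl (stepL s r n) (st, a2)).1, p < N) ∧
      (L.foldl (stepL s r n) (st, a2)).2.length = N ∧
      (L.foldl (stepR s r) (st, a1)).2.length = N ∧
      (∀ q, q < N → (L.foldl (stepL s r n) (st, a2)).2.getD q 0 =
        (n : Int) - (L.foldl (stepR s r) (st, a1)).2.getD (n - q) 0) := by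
  intro L
  induction L with
  | nil =>
    intro st a2 a1 hst _ h2 h1 hrel
    exact ⟨rfl, hst, h2, h1, hrel⟩
  | cons i L ih =>
    intro st a2 a1 hst hL h2 h1 hrel
    obtain ⟨ha, hb, hc2, hd, he⟩ := popLoopL_rel s r n i N hn st a2 a1 hst h2 h1 hrel
    have hiN : i < N := hL i List.mem_cons_self
    simp only [List.foldl_cons, stepL, stepR]
    rw [ha]
    apply ih
    · intro p hp
      rcases List.mem_cons.mp hp with h | h
      · omega
      · rw [← ha] at h
        exact hst p (hb p h)
    · exact fun j hj => hL j (List.mem_cons_of_mem _ hj)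
    · exact hc2
    · exact hd
    · exact he

-- the stack invariant of A's first pass
lemma phase1_inv (s r : List Int) (N : Nat) :
    ∀ m, m + 1 ≤ N →
      ((List.range' 1 m).foldl (stepR s r) ([0], (List.range N).map (fun (p : Nat) => (p : Int)))).1 =
        (cands s (m + 1)).reverse ∧
      ((List.range' 1 m).foldl (stepR s r) ([0], (List.range N).map (fun (p : Nat) => (p : Int)))).2.length = N ∧
      ∀ p, p < m + 1 → p ∉ cands s (m + 1) →
        ((List.range' 1 m).foldl (stepR s r) ([0], (List.range N).map (fun (p : Nat) => (p : Int)))).2.getD p 0 =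
          min ((p : Int) + r.getD p 0) ((scanR s (s.getD p 0) N (p + 1) : Int) - 1) := by
  intro m
  induction m with
  | zero =>
    intro _
    refine ⟨by simp [cands_one], by simp, fun p hp hnp => ?_⟩
    interval_cases p
    exact absurd (by rw [cands_one]; exact List.mem_cons_self) hnp
  | succ m ih =>
    intro hm
    obtain ⟨ihst, ihlen, ihval⟩ := ih (by omega)
    rw [List.range'_1_concat, List.foldl_append]
    set prev := (List.range' 1 m).foldl (stepR s r) ([0], (List.range N).map (fun (p : Nat) => (p : Int))) with hprev
    have h1m : 1 + m = m + 1 := by omega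
    simp only [List.foldl_cons, List.foldl_nil, stepR, h1m]
    have hpw : (prev.1).Pairwise (fun a b => s.getD a 0 < s.getD b 0) := by
      rw [ihst, List.pairwise_reverse]
      exact cands_pairwise s (m + 1)
    have hbd : ∀ p ∈ prev.1, p < prev.2.length := by
      intro p hp
      rw [ihst, List.mem_reverse] at hp
      rw [ihlen]
      have := (mem_cands.mp hp).1
      omega
    obtain ⟨hstk, hlen, hpt⟩ := popLoopR_spec s r (m + 1) prev.1 prev.2 hpw hbd
    refine ⟨?_, by rw [hlen, ihlen], fun p hp hnp => ?_⟩
    · rw [hstk, ihst, List.filter_reverse, cands_succ s (m + 1), List.reverse_append]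
      rfl
    · rw [hpt p]
      by_cases hpm : p = m + 1
      · exfalso
        apply hnp
        subst hpm
        rw [cands_succ]
        exact List.mem_append.mpr (Or.inr List.mem_cons_self)
      · have hplt : p < m + 1 := by omega
        have hmem_iff : p ∈ cands s (m + 2) ↔ p ∈ cands s (m + 1) ∧ s.getD (m + 1) 0 < s.getD p 0 := by
          rw [cands_succ s (m + 1), List.mem_append, List.mem_filter]
          constructor
          · intro h
            rcases h with h | h
            · exact ⟨h.1, by simpa using h.2⟩
            · simp at h; omega
          · intro h
            exact Or.inl ⟨h.1, by simpa using h.2⟩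
        by_cases hcm : p ∈ cands s (m + 1)
        · -- p was on the stack; since p ∉ cands (m+2), it is popped now
          have hps : s.getD p 0 ≤ s.getD (m + 1) 0 := by
            by_contra hlt
            exact hnp (hmem_iff.mpr ⟨hcm, not_le.mp hlt⟩)
          rw [if_pos ⟨by rw [ihst, List.mem_reverse]; exact hcm, hps⟩]
          have hfge : scanR s (s.getD p 0) N (p + 1) = m + 1 := by
            apply scanR_char s (s.getD p 0) N ((m + 1) - (p + 1)) (p + 1) (m + 1) rfl (by omega) (by omega)
            · intro q hq1 hq2
              exact (mem_cands.mp hcm).2 q hq2 (by omega)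
            · exact Or.inr (not_lt.mpr hps)
          rw [hfge]
          unfold wrV
          split_ifs with hcc <;> push_cast <;> omega
        · -- p was already popped earlier; untouched now
          have : ¬ (p ∈ prev.1 ∧ s.getD p 0 ≤ s.getD (m + 1) 0) := by
            intro ⟨hmem, _⟩
            rw [ihst, List.mem_reverse] at hmem
            exact hcm hmem
          rw [if_neg this]
          exact ihval p hplt hcm

-- final characterisation of A's first pass: ans1[p] = min(p + range[p], firstGE(p) - 1)
lemma phase1_getD (s r : List Int) (N : Nat) (hsN : s.length = N) (h1 : 1 ≤ N) :
    ∀ p, p < N →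
      (drainR s r N
        ((List.range' 1 (N - 1)).foldl (stepR s r) ([0], (List.range N).map (fun (p : Nat) => (p : Int)))).1
        ((List.range' 1 (N - 1)).foldl (stepR s r) ([0], (List.range N).map (fun (p : Nat) => (p : Int)))).2).getD p 0 =
      min ((p : Int) + r.getD p 0) ((scanR s (s.getD p 0) N (p + 1) : Int) - 1) := by
  intro p hp
  obtain ⟨hst, hlen, hval⟩ := phase1_inv s r N (N - 1) (by omega)
  have hN1 : N - 1 + 1 = N := by omega
  rw [hN1] at hst hval
  set prev := (List.range' 1 (N - 1)).foldl (stepR s r) ([0], (List.range N).map (fun (p : Nat) => (p : Int)))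
  have hbd : ∀ q ∈ prev.1, q < prev.2.length := by
    intro q hq
    rw [hst, List.mem_reverse] at hq
    rw [hlen]
    have := (mem_cands.mp hq).1
    omega
  obtain ⟨_, hpt⟩ := drainR_spec s r N prev.1 prev.2 hbd
  rw [hpt p]
  by_cases hcm : p ∈ cands s N
  · rw [if_pos (by rw [hst, List.mem_reverse]; exact hcm)]
    have hfge : scanR s (s.getD p 0) N (p + 1) = N := by
      apply scanR_char s (s.getD p 0) N (N - (p + 1)) (p + 1) N rfl (by omega) le_rfl
      · intro q hq1 hq2
        exact (mem_cands.mp hcm).2 q hq2 (by omega)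
      · exact Or.inl rfl
    rw [hfge]
    unfold wrV
    split_ifs with hcc <;> omega
  · rw [if_neg (by rw [hst, List.mem_reverse]; exact hcm)]
    exact hval p (by omega) hcm

-- A's second pass, reduced to the first pass on the reversed lists
lemma phase2_getD (s r : List Int) (N : Nat) (hsN : s.length = N) (h1 : 1 ≤ N) :
    ∀ q, q < N →
      (drainL s.reverse r.reverse (N - 1) N
        ((List.range' 1 (N - 1)).foldl (stepL s.reverse r.reverse (N - 1))
          ([0], (List.range N).map (fun (p : Nat) => (p : Int)))).1
        ((List.range' 1 (N - 1)).foldl (stepL s.reverse r.reverse (N - 1))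
          ([0], (List.range N).map (fun (p : Nat) => (p : Int)))).2).getD q 0 =
      ((N - 1 : Nat) : Int) -
        min (((N - 1 - q : Nat) : Int) + r.reverse.getD (N - 1 - q) 0)
          ((scanR s.reverse (s.reverse.getD (N - 1 - q) 0) N (N - 1 - q + 1) : Int) - 1) := by
  intro q hq
  have hn : (N - 1) + 1 = N := by omega
  have hinit_len : ((List.range N).map (fun (p : Nat) => (p : Int))).length = N := by simp
  have hinit_getD : ∀ j, j < N → ((List.range N).map (fun (p : Nat) => (p : Int))).getD j 0 = (j : Int) :=
    fun j hj => mapRange_getD _ N j hj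
  obtain ⟨hstk, hbnd, hlen2, hlen1, hrel⟩ :=
    foldSteps_rel s.reverse r.reverse (N - 1) N hn (List.range' 1 (N - 1)) [0]
      ((List.range N).map (fun (p : Nat) => (p : Int))) ((List.range N).map (fun (p : Nat) => (p : Int)))
      (by intro p hp; simp at hp; omega)
      (by intro i hi; have := List.mem_range'_1.mp hi; omega)
      hinit_len hinit_len
      (by intro j hj
          rw [hinit_getD j hj, hinit_getD (N - 1 - j) (by omega)]
          omega)
  set t2 := (List.range' 1 (N - 1)).foldl (stepL s.reverse r.reverse (N - 1))
      ([0], (List.range N).map (fun (p : Nat) => (p : Int)))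
  set t1 := (List.range' 1 (N - 1)).foldl (stepR s.reverse r.reverse)
      ([0], (List.range N).map (fun (p : Nat) => (p : Int)))
  have hdrel := drainL_rel s.reverse r.reverse (N - 1) N hn t1.1 t2.2 t1.2
      (hstk ▸ hbnd) hlen2 hlen1 hrel q hq
  rw [hstk, hdrel]
  have hrevlen : s.reverse.length = N := by rw [List.length_reverse, hsN]
  have hphase1 := phase1_getD s.reverse r.reverse N hrevlen h1 (N - 1 - q) (by omega)
  rw [hphase1]

-- ===== VERDICT (by name: the statement is the Claim_ definition above) =====
theorem warriors_spec : Claim_equal_warriors := by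
  intro s r hdom hpre
  obtain ⟨hne, hlenle⟩ := hpre
  have h1 : 1 ≤ s.length := List.length_pos_iff.mpr hne
  unfold Spec_warriors
  simp only [warriors, warriors_alt]
  apply PySem.List.foldl_congr_mem
  intro acc i hi
  have hiN : i < s.length := List.mem_range.mp hi
  have hA1 := phase1_getD s r s.length rfl h1 i hiN
  have hA2 := phase2_getD s r s.length rfl h1 i hiN
  rw [hA1, hA2]
  rw [PySem.List.foldl_append_singleton_eq_map
        (fun (i : Nat) => min ((i : Int) + r.getD i 0) ((scanR s (s.getD i 0) s.length (i + 1) : Int) - 1))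
        (List.range s.length) []]
  rw [List.nil_append]
  rw [mapRange_getD _ s.length i hiN]
  obtain ⟨-, hB2⟩ := foldl_set_rev
      (fun j => ((s.length - 1 : Nat) : Int) -
        min ((j : Int) + r.reverse.getD j 0)
          ((scanR s.reverse (s.reverse.getD j 0) s.length (j + 1) : Int) - 1))
      (s.length - 1) s.length (by omega) s.length le_rfl
  rw [hB2 i hiN, if_pos (by omega)]
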